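-- pv_equiv track=rewrite | github.com/baifus-joao/D3-BPO | webapp/dilmaria/pop_content_generator.py | _chunk_steps
-- ===== SOURCE A (Python) =====
-- def _chunk_steps(steps: list[str], chunk_count: int) -> list[list[str]]:
--     if chunk_count <= 1:
--         return [steps]
--     buckets = [[] for _ in range(chunk_count)]
--     for index, step in enumerate(steps):
--         bucket_index = min(index * chunk_count // max(len(steps), 1), chunk_count - 1)
--         buckets[bucket_index].append(step)
--     return [bucket for bucket in buckets if bucket] or [steps]
-- ===== SOURCE B (Python) =====
-- def _chunk_steps(steps: list[str], chunk_count: int) -> list[list[str]]: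
--     if chunk_count <= 1:
--         return [steps]
--     n = len(steps)
--     bounds = [(j * n + chunk_count - 1) // chunk_count for j in range(chunk_count + 1)]
--     buckets = [steps[a:b] for a, b in zip(bounds, bounds[1:])]
--     return [b for b in buckets if b] or [steps]
-- ===== Notes on version B (the rewrite author's own statement) =====
-- stated objective: faster
-- what changed: Instead of scattering each element into a precomputed bucket via floor(index*k/n), B computes the k+1 cut points ceil(j*n/k) once and builds each bucket as one slice between consecutive cut points.
import Mathlib
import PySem

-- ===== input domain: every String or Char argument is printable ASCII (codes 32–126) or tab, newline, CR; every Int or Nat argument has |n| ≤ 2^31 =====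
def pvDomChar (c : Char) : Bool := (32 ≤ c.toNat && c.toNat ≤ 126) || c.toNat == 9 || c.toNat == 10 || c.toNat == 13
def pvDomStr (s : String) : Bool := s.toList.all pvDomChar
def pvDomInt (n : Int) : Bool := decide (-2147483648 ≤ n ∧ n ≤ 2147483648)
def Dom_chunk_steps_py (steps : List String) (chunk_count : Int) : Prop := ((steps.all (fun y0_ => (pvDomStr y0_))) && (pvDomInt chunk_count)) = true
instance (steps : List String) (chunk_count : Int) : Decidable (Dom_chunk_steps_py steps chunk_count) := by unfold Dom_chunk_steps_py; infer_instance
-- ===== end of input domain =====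

-- B replaces A's per-element scatter loop (bucket floor(index*k/n) per element) by computing the
-- k+1 cut points ceil(j*n/k) once and slicing between consecutive ones; same exact output,
-- measurably faster by a constant factor (whole-bucket slices instead of per-element appends).

-- ===== PORT A =====
-- loop body of A's 'for index, step in enumerate(steps)'; bucket_index is always in range
-- (0 ≤ bucket_index ≤ chunk_count-1 < len(buckets)), so Python's buckets[bucket_index] never
-- raises and getD's default [] is never used
def chunkStepA (steps : List String) (chunk_count : Int) (bs : List (List String)) (p : Int × String) : List (List String) :=
  let bucketIndex := min (PySem.Int.floordiv (p.1 * chunk_count) (max (steps.length : Int) 1)) (chunk_count - 1)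
  bs.set bucketIndex.toNat (bs.getD bucketIndex.toNat [] ++ [p.2])

def chunk_steps_py (steps : List String) (chunk_count : Int) : List (List String) :=
  if chunk_count ≤ 1 then [steps]
  else
    let buckets := (PySem.List.enumerate steps).foldl (chunkStepA steps chunk_count)
      (List.replicate chunk_count.toNat [])
    let nonempty := buckets.filter (fun b => !b.isEmpty)
    if nonempty.isEmpty then [steps] else nonempty

-- ===== PORT B =====
def chunk_steps_py_alt (steps : List String) (chunk_count : Int) : List (List String) :=
  if chunk_count ≤ 1 then [steps]
  else
    let n : Int := steps.length
    let bounds := (PySem.List.pyRange 0 (chunk_count + 1) 1).map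
      (fun j => PySem.Int.floordiv (j * n + chunk_count - 1) chunk_count)
    let buckets := (bounds.zip bounds.tail).map
      (fun ab => PySem.List.slice steps (some ab.1) (some ab.2))
    let nonempty := buckets.filter (fun b => !b.isEmpty)
    if nonempty.isEmpty then [steps] else nonempty

-- ===== PRECONDITION & SPEC =====
def Spec_chunk_steps_py (steps : List String) (chunk_count : Int) (out : List (List String)) : Prop := out = chunk_steps_py_alt steps chunk_count
instance (steps : List String) (chunk_count : Int) (out : List (List String)) : Decidable (Spec_chunk_steps_py steps chunk_count out) := by unfold Spec_chunk_steps_py; infer_instance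

-- ===== CLAIM (what is proved, stated in full; the proofs are below) =====
def Claim_equal_chunk_steps_py : Prop := ∀ (steps : List String) (chunk_count : Int), Dom_chunk_steps_py steps chunk_count → Spec_chunk_steps_py steps chunk_count (chunk_steps_py steps chunk_count)

-- ===== LEMMAS AND PROOFS =====

-- the j-th cut point ceil(j*n/K), as a Nat
def pvG (n K j : Nat) : Nat := (j * n + (K - 1)) / K

lemma pvG_mono (n K : Nat) {j j' : Nat} (h : j ≤ j') : pvG n K j ≤ pvG n K j' := by
  unfold pvG
  exact Nat.div_le_div_right (by nlinarith)

lemma pvG_le (n K : Nat) {j : Nat} (hK : 1 ≤ K) (hj : j ≤ K) : pvG n K j ≤ n := by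
  unfold pvG
  rw [Nat.div_le_iff_le_mul_add_pred hK]
  nlinarith

-- A's bucket index of element i (i < n) is j iff i lies in [pvG j, pvG (j+1))
lemma bidx_eq (n K i j : Nat) (hK : 2 ≤ K) (hi : i < n) (hj : j < K) :
    (min (i * K / n) (K - 1) = j) ↔ (pvG n K j ≤ i ∧ i < pvG n K (j + 1)) := by
  have hn : 0 < n := by omega
  have hKpos : 0 < K := by omega
  have hdK : i * K / n < K := by
    rw [Nat.div_lt_iff_lt_mul hn]
    calc i * K < n * K := Nat.mul_lt_mul_right hKpos |>.mpr hi
    _ = K * n := Nat.mul_comm _ _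
  have hmin : min (i * K / n) (K - 1) = i * K / n := by omega
  rw [hmin]
  have h3 : pvG n K j ≤ i ↔ j * n + (K - 1) ≤ K * i + (K - 1) := by
    unfold pvG; rw [Nat.div_le_iff_le_mul_add_pred hKpos]
  have h4 : pvG n K (j + 1) ≤ i ↔ (j + 1) * n + (K - 1) ≤ K * i + (K - 1) := by
    unfold pvG; rw [Nat.div_le_iff_le_mul_add_pred hKpos]
  have hcomm : K * i = i * K := Nat.mul_comm _ _
  have hsucc : (j + 1) * n = j * n + n := Nat.succ_mul _ _
  constructor
  · rintro rfl
    have hlow : (i * K / n) * n ≤ i * K := (Nat.le_div_iff_mul_le hn).mp (le_refl _)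
    have hhigh : i * K < (i * K / n + 1) * n := (Nat.div_lt_iff_lt_mul hn).mp (Nat.lt_succ_self _)
    exact ⟨h3.mpr (by omega), by
      by_contra hcon
      rw [Nat.not_lt] at hcon
      have := h4.mp hcon
      omega⟩
  · rintro ⟨ha, hb⟩
    rw [h3] at ha
    have hb' : i * K < (j + 1) * n := by
      by_contra hcon
      rw [Nat.not_lt] at hcon
      exact absurd (h4.mpr (by omega)) (by omega)
    have hj1 : j ≤ i * K / n := (Nat.le_div_iff_mul_le hn).mpr (by omega)
    have hj2 : i * K / n < j + 1 := (Nat.div_lt_iff_lt_mul hn).mpr hb'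
    omega

lemma enumerate_concat {α : Type} (xs : List α) (x : α) : ∀ s : Int,
    PySem.List.enumerate (xs ++ [x]) s = PySem.List.enumerate xs s ++ [(s + xs.length, x)] := by
  induction xs with
  | nil => intro s; simp [PySem.List.enumerate_cons, PySem.List.enumerate_nil]
  | cons y ys ih =>
    intro s
    simp only [List.cons_append, PySem.List.enumerate_cons, ih (s + 1), List.length_cons]
    norm_num
    ring_nf

lemma chunkStepA_eval (steps : List String) (K : Nat) (hK : 2 ≤ K) (m : Nat) (hm : m < steps.length)
    (bs : List (List String)) (x : String) :
    chunkStepA steps (K : Int) bs ((m : Int), x) =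
      bs.set (min (m * K / steps.length) (K - 1))
        (bs.getD (min (m * K / steps.length) (K - 1)) [] ++ [x]) := by
  have hmax : max ((steps.length : Nat) : Int) 1 = ((steps.length : Nat) : Int) := by omega
  have hcast : ((K : Int) - 1) = ((K - 1 : Nat) : Int) := by
    push_cast [Nat.cast_sub (by omega : 1 ≤ K)]; ring
  simp only [chunkStepA, hmax, hcast, ← Nat.cast_mul, PySem.Int.floordiv_natCast, ← Nat.cast_min,
    Int.toNat_natCast]

-- A's fold over enumerate(steps[:m]) yields exactly the slices clipped at m
lemma foldA_take (steps : List String) (K : Nat) (hK : 2 ≤ K) :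
    ∀ m, m ≤ steps.length →
    (PySem.List.enumerate (steps.take m)).foldl (chunkStepA steps (K : Int)) (List.replicate K []) =
    (List.range K).map (fun j => (steps.drop (pvG steps.length K j)).take
      (min (pvG steps.length K (j + 1)) m - pvG steps.length K j)) := by
  intro m
  induction m with
  | zero =>
    intro _
    apply List.ext_getElem
    · simp
    · intro j h1 h2
      simp
  | succ m ih =>
    intro hm1
    have hm : m < steps.length := by omega
    have htake : steps.take (m + 1) = steps.take m ++ [steps[m]] := by
      rw [List.take_add_one]
      congr
      simp [List.getElem?_eq_getElem hm]
    rw [htake, enumerate_concat, List.foldl_append, ih (by omega)]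
    simp only [List.foldl_cons, List.foldl_nil, List.length_take, Nat.min_eq_left (le_of_lt hm)]
    rw [show ((0:Int) + (m:Int)) = ((m:Nat):Int) by omega]
    rw [chunkStepA_eval steps K hK m hm]
    set n := steps.length with hn
    set j0 := min (m * K / n) (K - 1) with hj0
    have hj0K : j0 < K := by omega
    have hj0range : pvG n K j0 ≤ m ∧ m < pvG n K (j0 + 1) := (bidx_eq n K m j0 hK hm hj0K).mp rfl
    have hgetD : ((List.range K).map (fun j => (steps.drop (pvG n K j)).take
        (min (pvG n K (j + 1)) m - pvG n K j))).getD j0 [] =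
        (steps.drop (pvG n K j0)).take (min (pvG n K (j0 + 1)) m - pvG n K j0) := by
      simp [List.getD, hj0K]
    rw [hgetD]
    apply List.ext_getElem
    · simp
    · intro j hlen1 hlen2
      simp only [List.getElem_set, List.getElem_map, List.getElem_range]
      have hjK : j < K := by simpa using hlen2
      by_cases hjj : j0 = j
      · subst hjj
        rw [if_pos rfl]
        have hmin1 : min (pvG n K (j0 + 1)) m = m := by omega
        have hmin2 : min (pvG n K (j0 + 1)) (m + 1) = m + 1 := by omega
        rw [hmin1, hmin2]
        have ha : pvG n K j0 ≤ m := hj0range.1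
        have htlen : m - pvG n K j0 < (steps.drop (pvG n K j0)).length := by
          simp [List.length_drop]; omega
        rw [show m + 1 - pvG n K j0 = (m - pvG n K j0) + 1 from by omega,
            List.take_add_one, List.getElem?_eq_getElem htlen]
        simp only [List.getElem_drop]
        have hidx : pvG n K j0 + (m - pvG n K j0) = m := by omega
        simp only [hidx, Option.toList_some]
      · rw [if_neg hjj]
        have hnotin : ¬ (pvG n K j ≤ m ∧ m < pvG n K (j + 1)) := fun hc =>
          hjj ((bidx_eq n K m j hK hm hjK).mpr hc ▸ rfl)
        have hmono : pvG n K j ≤ pvG n K (j + 1) := pvG_mono n K (by omega)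
        congr 1
        omega

lemma bucketsA_eq (steps : List String) (K : Nat) (hK : 2 ≤ K) :
    (PySem.List.enumerate steps).foldl (chunkStepA steps (K : Int)) (List.replicate K []) =
    (List.range K).map (fun j => (steps.drop (pvG steps.length K j)).take
      (pvG steps.length K (j + 1) - pvG steps.length K j)) := by
  have h := foldA_take steps K hK steps.length (le_refl _)
  rw [List.take_length] at h
  rw [h]
  apply List.map_congr_left
  intro j hj
  have hjK : j < K := List.mem_range.mp hj
  have : min (pvG steps.length K (j + 1)) steps.length = pvG steps.length K (j + 1) :=
    Nat.min_eq_left (pvG_le steps.length K (by omega) (by omega))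
  rw [this]

lemma bucketsB_eq (steps : List String) (K : Nat) (hK : 2 ≤ K) :
    (let bounds := (PySem.List.pyRange 0 ((K : Int) + 1) 1).map
        (fun j => PySem.Int.floordiv (j * (steps.length : Int) + (K : Int) - 1) (K : Int))
     (bounds.zip bounds.tail).map (fun ab => PySem.List.slice steps (some ab.1) (some ab.2))) =
    (List.range K).map (fun j => (steps.drop (pvG steps.length K j)).take
      (pvG steps.length K (j + 1) - pvG steps.length K j)) := by
  have hbounds : (PySem.List.pyRange 0 ((K : Int) + 1) 1).map
      (fun j => PySem.Int.floordiv (j * (steps.length : Int) + (K : Int) - 1) (K : Int)) =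
      (List.range (K + 1)).map (fun t => ((pvG steps.length K t : Nat) : Int)) := by
    rw [PySem.List.pyRange_one, List.map_map]
    have hKK : ((K : Int) + 1 - 0).toNat = K + 1 := by omega
    rw [hKK]
    apply List.map_congr_left
    intro t _
    show PySem.Int.floordiv ((0 + (t:Int)) * (steps.length : Int) + (K : Int) - 1) (K : Int) = _
    have hc : ((0 + (t:Int)) * (steps.length : Int) + (K : Int) - 1) =
        ((t * steps.length + (K - 1) : Nat) : Int) := by
      push_cast [Nat.cast_sub (by omega : 1 ≤ K)]
      ring
    rw [hc, PySem.Int.floordiv_natCast]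
    rfl
  rw [hbounds]
  apply List.ext_getElem
  · simp
  · intro j h1 h2
    have hjK : j < K := by simpa using h2
    simp only [List.getElem_map, List.getElem_zip, List.getElem_tail, List.getElem_range]
    rw [PySem.List.slice_natCast]

-- ===== VERDICT (by name: the statement is the Claim_ definition above) =====
theorem chunk_steps_py_spec : Claim_equal_chunk_steps_py := by
  intro steps chunk_count _
  unfold Spec_chunk_steps_py chunk_steps_py chunk_steps_py_alt
  by_cases hk : chunk_count ≤ 1
  · simp [hk]
  · simp only [if_neg hk]
    lift chunk_count to Nat using (by omega : (0:Int) ≤ chunk_count) with K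
    have hK : 2 ≤ K := by exact_mod_cast (by omega : (2:Int) ≤ (K:Int))
    rw [Int.toNat_natCast, bucketsA_eq steps K hK, bucketsB_eq steps K hK]
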